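-- pv_equiv track=rewrite | github.com/subirshakya/phast_scripts | lib/MafIO_edited.py | _ucscbin
-- ===== SOURCE A (Python) =====
-- def _ucscbin(start, end):
--     """Return the smallest bin a given region will fit into (PRIVATE).
--
--     Adapted from http://genomewiki.ucsc.edu/index.php/Bin_indexing_system
--     """
--     bin_offsets = [512 + 64 + 8 + 1, 64 + 8 + 1, 8 + 1, 1, 0]
--
--     _bin_first_shift = 17
--     _bin_next_shift = 3
--
--     start_bin = start
--     end_bin = end - 1
--
--     start_bin >>= _bin_first_shift
--     end_bin >>= _bin_first_shift
--
--     for bin_offset in bin_offsets: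
--         if start_bin == end_bin:
--             return bin_offset + start_bin
--         start_bin >>= _bin_next_shift
--         end_bin >>= _bin_next_shift
--
--     return 0
-- ===== SOURCE B (Python) =====
-- def _ucscbin(start, end):
--     s = start >> 17
--     d = s ^ ((end - 1) >> 17)
--     if d < 0:
--         return 0
--     i = (d.bit_length() + 2) // 3
--     if i > 4:
--         return 0
--     return [585, 73, 9, 1, 0][i] + (s >> (3 * i))
-- ===== Notes on version B (the rewrite author's own statement) =====
-- stated objective: alternative
-- what changed: Replaces the iterative compare-and-shift loop over the five bin offsets by a closed form: one XOR of the 17-bit-shifted endpoints and its bit length directly select the bin level.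
import Mathlib
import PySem

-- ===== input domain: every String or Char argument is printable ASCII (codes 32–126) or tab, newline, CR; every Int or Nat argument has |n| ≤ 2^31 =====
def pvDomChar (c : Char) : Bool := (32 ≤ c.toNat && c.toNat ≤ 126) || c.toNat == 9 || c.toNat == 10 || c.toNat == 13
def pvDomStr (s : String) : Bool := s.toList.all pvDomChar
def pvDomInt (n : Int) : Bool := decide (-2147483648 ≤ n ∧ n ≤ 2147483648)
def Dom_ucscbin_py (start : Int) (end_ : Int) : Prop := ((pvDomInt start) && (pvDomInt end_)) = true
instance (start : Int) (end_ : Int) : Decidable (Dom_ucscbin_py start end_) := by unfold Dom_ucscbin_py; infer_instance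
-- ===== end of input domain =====

-- B replaces A's iterative compare-and-shift loop by a closed form: the XOR of the two
-- 17-bit-shifted endpoints and its bit length select the bin level directly (alternative).

-- ===== PORT A =====
-- the `for bin_offset in bin_offsets` loop with its early return
def ucscbinLoop : List Int → Int → Int → Int
  | [], _, _ => 0
  | o :: rest, start_bin, end_bin =>
      if start_bin = end_bin then o + start_bin
      else ucscbinLoop rest (start_bin >>> (3 : Nat)) (end_bin >>> (3 : Nat))

def ucscbin_py (start : Int) (end_ : Int) : Int :=
  let bin_offsets : List Int := [512 + 64 + 8 + 1, 64 + 8 + 1, 8 + 1, 1, 0]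
  let start_bin := start >>> (17 : Nat)
  let end_bin := (end_ - 1) >>> (17 : Nat)
  ucscbinLoop bin_offsets start_bin end_bin

-- ===== PORT B =====
def ucscbin_py_alt (start : Int) (end_ : Int) : Int :=
  let s := start >>> (17 : Nat)
  let d := PySem.Int.bxor s ((end_ - 1) >>> (17 : Nat))
  if d < 0 then 0
  else
    let i := (PySem.Int.bitLength d + 2) / 3
    if i > 4 then 0
    else ([585, 73, 9, 1, 0] : List Int).getD i 0 + (s >>> (3 * i))

-- ===== PRECONDITION & SPEC =====
def Spec_ucscbin_py (start : Int) (end_ : Int) (out : Int) : Prop := out = ucscbin_py_alt start end_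
instance (start : Int) (end_ : Int) (out : Int) : Decidable (Spec_ucscbin_py start end_ out) := by unfold Spec_ucscbin_py; infer_instance

-- ===== CLAIM (what is proved, stated in full; the proofs are below) =====
def Claim_equal_ucscbin_py : Prop := ∀ (start : Int) (end_ : Int), Dom_ucscbin_py start end_ → Spec_ucscbin_py start end_ (ucscbin_py start end_)

-- ===== LEMMAS AND PROOFS =====

theorem natCast_shiftRight_pv (m k : Nat) : ((m : Int) >>> k) = ((m >>> k : Nat) : Int) := rfl

theorem negSucc_shiftRight_pv (m k : Nat) : (Int.negSucc m) >>> k = Int.negSucc (m >>> k) := rfl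

theorem neg_eq_negSucc_pv (a : Int) (h : a < 0) : a = Int.negSucc (-a - 1).toNat := by
  rw [Int.negSucc_eq]
  have : ((-a - 1).toNat : Int) = -a - 1 := Int.toNat_of_nonneg (by omega)
  omega

theorem bxor_negSucc_pv (m n : Nat) :
    PySem.Int.bxor (Int.negSucc m) (Int.negSucc n) = ((m ^^^ n : Nat) : Int) := by
  unfold PySem.Int.bxor
  rw [if_neg (by omega), if_neg (by omega)]
  simp [Int.negSucc_eq]

theorem bxor_mixed_neg_pv (a b : Int) (ha : 0 ≤ a) (hb : b < 0) : PySem.Int.bxor a b < 0 := by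
  unfold PySem.Int.bxor
  rw [if_pos ha, if_neg (by omega)]
  have := Int.natCast_nonneg (a.toNat ^^^ (-b - 1).toNat)
  omega

theorem shiftRight_neg_pv (a : Int) (k : Nat) (h : a < 0) : a >>> k < 0 := by
  rw [neg_eq_negSucc_pv a h, negSucc_shiftRight_pv]
  exact Int.negSucc_lt_zero _

theorem nat_shiftRight_eq_iff_xor (m n k : Nat) :
    (m >>> k = n >>> k) ↔ (m ^^^ n) < 2 ^ k := by
  rw [← Nat.xor_eq_zero_iff, ← Nat.shiftRight_xor_distrib, Nat.shiftRight_eq_div_pow,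
    Nat.div_eq_zero_iff]
  have : (2 : Nat) ^ k ≠ 0 := (Nat.pow_pos (by norm_num)).ne'
  tauto

-- the two's-complement fact behind B: the k-bit-shifted endpoints agree iff their XOR is a
-- nonnegative number below 2^k
theorem shift_eq_iff_bxor (a b : Int) (k : Nat) :
    (a >>> k = b >>> k) ↔ (0 ≤ PySem.Int.bxor a b ∧ (PySem.Int.bxor a b).natAbs < 2 ^ k) := by
  by_cases ha : 0 ≤ a <;> by_cases hb : 0 ≤ b
  · obtain ⟨m, rfl⟩ := Int.eq_ofNat_of_zero_le ha
    obtain ⟨n, rfl⟩ := Int.eq_ofNat_of_zero_le hb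
    rw [PySem.Int.bxor_natCast, natCast_shiftRight_pv, natCast_shiftRight_pv, Int.natCast_inj,
      nat_shiftRight_eq_iff_xor, Int.natAbs_natCast]
    exact ⟨fun h => ⟨Int.natCast_nonneg _, h⟩, fun h => h.2⟩
  · have h1 : PySem.Int.bxor a b < 0 := bxor_mixed_neg_pv a b ha (by omega)
    have h2 : b >>> k < 0 := shiftRight_neg_pv b k (by omega)
    obtain ⟨m, rfl⟩ := Int.eq_ofNat_of_zero_le ha
    rw [natCast_shiftRight_pv]
    constructor
    · intro h; exfalso; have := Int.natCast_nonneg (m >>> k); omega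
    · rintro ⟨h, -⟩; exfalso; omega
  · have h1 : PySem.Int.bxor a b < 0 := by
      rw [PySem.Int.bxor_comm]; exact bxor_mixed_neg_pv b a hb (by omega)
    have h2 : a >>> k < 0 := shiftRight_neg_pv a k (by omega)
    obtain ⟨n, rfl⟩ := Int.eq_ofNat_of_zero_le hb
    rw [natCast_shiftRight_pv]
    constructor
    · intro h; exfalso; have := Int.natCast_nonneg (n >>> k); omega
    · rintro ⟨h, -⟩; exfalso; omega
  · rw [neg_eq_negSucc_pv a (by omega), neg_eq_negSucc_pv b (by omega),
      bxor_negSucc_pv, negSucc_shiftRight_pv, negSucc_shiftRight_pv, Int.negSucc_inj,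
      nat_shiftRight_eq_iff_xor]
    simp

theorem bitLength_le_iff_pv (d : Int) (k : Nat) :
    PySem.Int.bitLength d ≤ k ↔ d.natAbs < 2 ^ k := by
  constructor
  · intro h
    exact lt_of_lt_of_le (PySem.Int.lt_two_pow_bitLength d) (Nat.pow_le_pow_right (by omega) h)
  · intro h
    by_contra hk
    by_cases hz : d = 0
    · simp [hz] at hk
    · have h1 := PySem.Int.two_pow_bitLength_le d hz
      have h2 : 2 ^ k ≤ 2 ^ (PySem.Int.bitLength d - 1) :=
        Nat.pow_le_pow_right (by omega) (by omega)
      omega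

-- the loop's level-k test, phrased via the XOR's bit length (what B computes)
theorem cond_iff_pv (s e : Int) (k : Nat) :
    (s >>> k = e >>> k) ↔
      (0 ≤ PySem.Int.bxor s e ∧ PySem.Int.bitLength (PySem.Int.bxor s e) ≤ k) := by
  rw [shift_eq_iff_bxor, bitLength_le_iff_pv]

-- ===== VERDICT (by name: the statement is the Claim_ definition above) =====
theorem ucscbin_py_spec : Claim_equal_ucscbin_py := by
  intro start end_ _
  unfold Spec_ucscbin_py ucscbin_py ucscbin_py_alt
  set s := start >>> (17 : Nat) with hs
  set e := (end_ - 1) >>> (17 : Nat) with he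
  set d := PySem.Int.bxor s e with hd
  set L := PySem.Int.bitLength d with hL
  have shift0 : ∀ x : Int, x >>> (0 : Nat) = x := by rintro (m | m) <;> rfl
  have sh3 : ∀ x : Int, (x >>> (3 : Nat)) >>> (3 : Nat) = x >>> (6 : Nat) := fun x => by
    rw [← Int.shiftRight_add]
  have sh9 : ∀ x : Int, (x >>> (6 : Nat)) >>> (3 : Nat) = x >>> (9 : Nat) := fun x => by
    rw [← Int.shiftRight_add]
  have sh12 : ∀ x : Int, (x >>> (9 : Nat)) >>> (3 : Nat) = x >>> (12 : Nat) := fun x => by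
    rw [← Int.shiftRight_add]
  have c0 := cond_iff_pv s e 0
  have c3 := cond_iff_pv s e 3
  have c6 := cond_iff_pv s e 6
  have c9 := cond_iff_pv s e 9
  have c12 := cond_iff_pv s e 12
  rw [← hd, ← hL] at c0 c3 c6 c9 c12
  rw [shift0, shift0] at c0
  simp only [ucscbinLoop, sh3, sh9, sh12]
  rw [← hd, ← hL]
  by_cases hneg : d < 0
  · rw [if_pos hneg,
        if_neg (by rw [c0]; rintro ⟨h, -⟩; omega),
        if_neg (by rw [c3]; rintro ⟨h, -⟩; omega),
        if_neg (by rw [c6]; rintro ⟨h, -⟩; omega),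
        if_neg (by rw [c9]; rintro ⟨h, -⟩; omega),
        if_neg (by rw [c12]; rintro ⟨h, -⟩; omega)]
  · rw [if_neg hneg]
    have hpos : 0 ≤ d := by omega
    by_cases h0 : s = e
    · rw [if_pos h0, show (L + 2) / 3 = 0 by have := (c0.mp h0).2; omega]
      norm_num [shift0]
    · rw [if_neg h0]
      have hL0 : ¬ L ≤ 0 := fun h => h0 (c0.mpr ⟨hpos, h⟩)
      by_cases h3 : s >>> (3 : Nat) = e >>> (3 : Nat)
      · rw [if_pos h3, show (L + 2) / 3 = 1 by have := (c3.mp h3).2; omega]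
        norm_num
      · have hL3 : ¬ L ≤ 3 := fun h => h3 (c3.mpr ⟨hpos, h⟩)
        rw [if_neg h3]
        by_cases h6 : s >>> (6 : Nat) = e >>> (6 : Nat)
        · rw [if_pos h6, show (L + 2) / 3 = 2 by have := (c6.mp h6).2; omega]
          norm_num
        · have hL6 : ¬ L ≤ 6 := fun h => h6 (c6.mpr ⟨hpos, h⟩)
          rw [if_neg h6]
          by_cases h9 : s >>> (9 : Nat) = e >>> (9 : Nat)
          · rw [if_pos h9, show (L + 2) / 3 = 3 by have := (c9.mp h9).2; omega]
            norm_num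
          · have hL9 : ¬ L ≤ 9 := fun h => h9 (c9.mpr ⟨hpos, h⟩)
            rw [if_neg h9]
            by_cases h12 : s >>> (12 : Nat) = e >>> (12 : Nat)
            · rw [if_pos h12, show (L + 2) / 3 = 4 by have := (c12.mp h12).2; omega]
              norm_num
            · have hL12 : ¬ L ≤ 12 := fun h => h12 (c12.mpr ⟨hpos, h⟩)
              rw [if_neg h12, if_pos (show (L + 2) / 3 > 4 by omega)]
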